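-- pv_equiv track=rewrite | github.com/jiwon3401/coding_study | 프로그래머스/lv1/68644. 두 개 뽑아서 더하기/두 개 뽑아서 더하기.py | solution
-- ===== SOURCE A (Python) =====
-- from itertools import combinations
--
-- def solution(numbers):
--     answer = []
--     comb = list(combinations(numbers,2))
--     for i in comb:
--         answer.append(i[0]+i[1])
--     answer.sort()
--
--     ans =[]
--     for i in answer:
--         if i not in ans:
--             ans.append(i)
--     return ans
-- ===== SOURCE B (Python) =====
-- def _insert_unique(out, s):
--     # out is sorted and duplicate-free; insert s keeping it so
--     k = 0
--     n = len(out)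
--     while k < n and out[k] < s:
--         k += 1
--     if k < n and out[k] == s:
--         return out
--     return out[:k] + [s] + out[k:]
--
--
-- def solution(numbers):
--     out = []
--     rest = numbers
--     while rest:
--         x, rest = rest[0], rest[1:]
--         for y in rest:
--             out = _insert_unique(out, x + y)
--     return out
-- ===== Notes on version B (the rewrite author's own statement) =====
-- stated objective: alternative
-- what changed: Maintains one sorted duplicate-free accumulator and inserts every pair sum at its ordered position (skipping sums already present), so there is no combinations list, no sort call and no separate dedup pass; A builds the full multiset of sums, sorts it, then deduplicates with a quadratic membership scan.
import Mathlib
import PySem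

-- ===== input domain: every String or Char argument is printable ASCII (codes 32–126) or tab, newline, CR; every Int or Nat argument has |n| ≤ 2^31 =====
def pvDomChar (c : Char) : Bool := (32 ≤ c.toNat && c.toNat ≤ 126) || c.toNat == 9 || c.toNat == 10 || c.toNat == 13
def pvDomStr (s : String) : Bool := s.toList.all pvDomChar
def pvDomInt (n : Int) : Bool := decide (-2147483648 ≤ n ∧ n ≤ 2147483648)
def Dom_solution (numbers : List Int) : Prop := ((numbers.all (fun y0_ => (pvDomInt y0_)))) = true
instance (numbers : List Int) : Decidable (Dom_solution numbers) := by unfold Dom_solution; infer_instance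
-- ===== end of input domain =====

-- B maintains one sorted duplicate-free accumulator and inserts each pair sum at its ordered
-- position, replacing A's combinations list + full sort + quadratic dedup pass (objective: alternative).


-- ===== PORT A =====
def solution (numbers : List Int) : List Int :=
  let comb := PySem.List.combinations numbers 2
  let answer := comb.foldl (fun acc i => acc ++ [PySem.List.pyGetD i 0 0 + PySem.List.pyGetD i 1 0]) []
  let answer := PySem.List.sorted answer (fun x => x) false
  answer.foldl (fun ans i => if ans.contains i then ans else ans ++ [i]) []

-- ===== PORT B =====
-- Source B's _insert_unique: scan forward while out[k] < s (the while loop, rendered as the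
-- structural recursion over the scanned prefix); if out[k] == s return out unchanged,
-- else splice s in at position k.
def insertUnique : List Int → Int → List Int
  | [], s => [s]
  | h :: t, s => if h < s then h :: insertUnique t s else if h == s then h :: t else s :: h :: t

-- while rest: x, rest = rest[0], rest[1:]; for y in rest: out = _insert_unique(out, x + y)
def pairsLoop : List Int → List Int → List Int
  | [], out => out
  | x :: rest, out => pairsLoop rest (rest.foldl (fun out y => insertUnique out (x + y)) out)

def solution_alt (numbers : List Int) : List Int :=
  pairsLoop numbers []

-- ===== PRECONDITION & SPEC =====
def Spec_solution (numbers : List Int) (out : List Int) : Prop := out = solution_alt numbers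
instance (numbers : List Int) (out : List Int) : Decidable (Spec_solution numbers out) := by unfold Spec_solution; infer_instance

-- ===== CLAIM (what is proved, stated in full; the proofs are below) =====
def Claim_equal_solution : Prop := ∀ (numbers : List Int), Dom_solution numbers → Spec_solution numbers (solution numbers)

-- ===== LEMMAS AND PROOFS =====

-- all pair sums of l, in A's combination order (proof-side characterisation of A's 'answer')
def pairList : List Int → List Int
  | [] => []
  | x :: rest => rest.map (x + ·) ++ pairList rest

theorem answer_eq_pairList (l : List Int) :
    (PySem.List.combinations l 2).foldl
      (fun acc i => acc ++ [PySem.List.pyGetD i 0 0 + PySem.List.pyGetD i 1 0]) []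
      = pairList l := by
  rw [PySem.List.foldl_append_singleton_eq_map]
  induction l with
  | nil => simp [PySem.List.combinations_nil_succ, pairList]
  | cons x rest ih =>
    rw [show (2:Nat) = 1+1 from rfl, PySem.List.combinations_cons_succ,
      PySem.List.combinations_one]
    simp only [List.map_append, List.map_map, pairList, List.nil_append] at ih ⊢
    rw [show (1+1 : Nat) = 2 from rfl, ih]
    simp [Function.comp_def, pysem]

-- A's dedup-by-membership loop is exactly set(...) in first-occurrence order
theorem dedup_eq_ofList (xs : List Int) :
    xs.foldl (fun ans i => if ans.contains i then ans else ans ++ [i]) []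
      = PySem.Set.ofList xs := by
  rw [PySem.Set.ofList_eq_foldl]; rfl

theorem ofList_sublist (xs : List Int) : (PySem.Set.ofList xs).Sublist xs := by
  induction xs with
  | nil => simp [PySem.Set.ofList_nil]
  | cons x xs ih =>
    rw [PySem.Set.ofList_cons]
    refine List.Sublist.cons₂ x (List.Sublist.trans ?_ ih)
    simp [PySem.Set.discard]

-- B-side: insertUnique adds exactly s
theorem mem_insertUnique (out : List Int) (s v : Int) :
    v ∈ insertUnique out s ↔ v ∈ out ∨ v = s := by
  induction out with
  | nil => simp [insertUnique]
  | cons h t ih =>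
    simp only [insertUnique]
    split_ifs with h1 h2
    · simp [ih]; tauto
    · have : h = s := by simpa using h2
      subst this; simp; tauto
    · simp; tauto

-- B-side: insertUnique preserves strict sortedness
theorem pairwise_insertUnique (out : List Int) (s : Int)
    (h : out.Pairwise (· < ·)) : (insertUnique out s).Pairwise (· < ·) := by
  induction out with
  | nil => simp [insertUnique]
  | cons x t ih =>
    simp only [insertUnique]
    rcases List.pairwise_cons.mp h with ⟨hx, ht⟩
    split_ifs with h1 h2
    · exact List.pairwise_cons.mpr ⟨fun v hv => by
        rcases (mem_insertUnique t s v).mp hv with hvt | rfl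
        · exact hx v hvt
        · exact h1, ih ht⟩
    · exact h
    · have hsx : s < x := lt_of_le_of_ne (not_lt.mp h1) (fun e => h2 (by simp [e]))
      exact List.pairwise_cons.mpr ⟨fun v hv => by
        rcases List.mem_cons.mp hv with rfl | hvt
        · exact hsx
        · exact lt_trans hsx (hx v hvt), h⟩

theorem foldl_insert_mem (x : Int) (l : List Int) (out : List Int) (v : Int) :
    v ∈ l.foldl (fun out y => insertUnique out (x + y)) out ↔
      v ∈ out ∨ v ∈ l.map (x + ·) := by
  induction l generalizing out with
  | nil => simp
  | cons y t ih => simp [ih, mem_insertUnique]; tauto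

theorem foldl_insert_pairwise (x : Int) (l : List Int) (out : List Int)
    (h : out.Pairwise (· < ·)) :
    (l.foldl (fun out y => insertUnique out (x + y)) out).Pairwise (· < ·) := by
  induction l generalizing out with
  | nil => exact h
  | cons y t ih => exact ih _ (pairwise_insertUnique _ _ h)

theorem mem_pairsLoop (l : List Int) (out : List Int) (v : Int) :
    v ∈ pairsLoop l out ↔ v ∈ out ∨ v ∈ pairList l := by
  induction l generalizing out with
  | nil => simp [pairsLoop, pairList]
  | cons x rest ih =>
    simp only [pairsLoop, pairList, ih, foldl_insert_mem, List.mem_append]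
    tauto

theorem pairwise_pairsLoop (l : List Int) (out : List Int)
    (h : out.Pairwise (· < ·)) : (pairsLoop l out).Pairwise (· < ·) := by
  induction l generalizing out with
  | nil => exact h
  | cons x rest ih => exact ih _ (foldl_insert_pairwise _ _ _ h)

-- two strictly increasing lists with the same members are equal
theorem eq_of_strict_of_mem_iff (l m : List Int)
    (hl : l.Pairwise (· < ·)) (hm : m.Pairwise (· < ·))
    (h : ∀ v, v ∈ l ↔ v ∈ m) : l = m := by
  have hln : l.Nodup := hl.imp ne_of_lt
  have hmn : m.Nodup := hm.imp ne_of_lt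
  exact ((List.perm_ext_iff_of_nodup hln hmn).mpr h).eq_of_pairwise'
    (hl.imp le_of_lt) (hm.imp le_of_lt)

theorem solution_eq_alt (numbers : List Int) :
    solution numbers = solution_alt numbers := by
  unfold solution solution_alt
  simp only []
  rw [answer_eq_pairList, dedup_eq_ofList]
  set sA := PySem.List.sorted (pairList numbers) (fun x => x) false with hsA
  refine eq_of_strict_of_mem_iff _ _ ?_ (pairwise_pairsLoop _ _ (by simp)) ?_
  · have h1 : sA.Pairwise (fun a b => a ≤ b) := PySem.List.sorted_pairwise _ _
    have h2 : (PySem.Set.ofList sA).Pairwise (fun a b => a ≤ b) := h1.sublist (ofList_sublist sA)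
    have h3 : (PySem.Set.ofList sA).Pairwise (fun a b => a ≠ b) := PySem.Set.nodup_ofList _
    exact (h2.and h3).imp (fun h => lt_of_le_of_ne h.1 h.2)
  · intro v
    rw [PySem.Set.mem_ofList, mem_pairsLoop, hsA, PySem.List.mem_sorted]
    simp

-- ===== VERDICT (by name: the statement is the Claim_ definition above) =====
theorem solution_spec : Claim_equal_solution := by
  intro numbers _
  unfold Spec_solution
  exact solution_eq_alt numbers
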